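-- pv_equiv track=rewrite | github.com/NPaspallis/CO1417 | week09-password-cracking/step0904/word_generator.py | word_generator
-- ===== SOURCE A (Python) =====
-- def word_generator(num_of_letters):
--     """
--     Returns an iterator which produces a sequence of all possible combinations of n-sized words.
--     For example, for num_of_letters=5, it produces: 'aaaaa', 'aaaab', 'aaaac', ..., 'zzzzx', 'zzzzy', 'zzzzz'.
--     """
--     first_word = 'a' * num_of_letters  # c is initialized as num_of_letters copies of 'a', e.g. 'aaaaa' for 5
--     c = list(first_word)  # converts string to a list of characters
--     while True:
--         word = "".join(c)  # joins characters in list to produce string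
--         yield word
--         exhausted = True
--         # move on to next word
--         for j in range(num_of_letters-1, -1, -1):  # get numbers from num_of_letters-1 down to 0
--             if c[j] < 'z':
--                 c[j] = chr(ord(c[j]) + 1)  # modify j-th character, move to next character in alphabet
--                 exhausted = False
--                 break
--             else:
--                 c[j] = 'a'
--
--         # if we reach this point with the 'exhausted' flag still up, it means there is nothing more to do
--         if exhausted:
--             return
-- ===== SOURCE B (Python) =====
-- def word_generator(num_of_letters):
--     def gen(n):
--         if n <= 0:
--             yield ""
--             return
--         for i in range(26):
--             ch = chr(ord('a') + i)
--             for rest in gen(n - 1):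
--                 yield ch + rest
--     yield from gen(num_of_letters)
-- ===== Notes on version B (the rewrite author's own statement) =====
-- stated objective: alternative
-- what changed: Replaces A's in-place odometer loop (mutating a char list and scanning right-to-left for the carry) by a lazy recursive generator over the word length that prefixes each letter to every shorter suffix.
import Mathlib
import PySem

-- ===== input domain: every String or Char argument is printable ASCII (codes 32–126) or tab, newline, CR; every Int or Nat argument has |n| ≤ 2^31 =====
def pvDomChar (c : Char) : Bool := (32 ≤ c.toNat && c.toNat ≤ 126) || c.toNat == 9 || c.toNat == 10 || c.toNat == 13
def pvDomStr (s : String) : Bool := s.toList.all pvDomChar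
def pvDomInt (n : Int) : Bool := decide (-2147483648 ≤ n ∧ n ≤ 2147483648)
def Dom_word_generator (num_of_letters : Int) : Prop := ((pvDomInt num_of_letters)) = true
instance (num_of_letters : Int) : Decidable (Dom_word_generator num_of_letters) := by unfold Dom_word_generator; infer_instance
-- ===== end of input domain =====

-- B replaces A's in-place odometer (mutate a char list, carry right-to-left) by a recursive
-- generator over the word length; same output order, similar cost (objective: alternative).
-- Both generators are ported as the full list of yielded words.

-- ===== PORT A =====
-- Python's inner `for j in range(num_of_letters-1, -1, -1)` scans from the right,
-- resetting 'z' to 'a' until it can increment a character ("break" = the Bool turning false);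
-- ported as right-first recursion over the char list.
def wgBump : List Char → List Char × Bool
  | [] => ([], true)
  | c :: rest =>
    let (r, ex) := wgBump rest
    if ex then
      if c < 'z' then (Char.ofNat (c.toNat + 1) :: r, false)
      else ('a' :: r, true)
    else (c :: r, false)

-- the `while True` loop; the fuel `26 ^ n` is a totality guard only (it is exactly the
-- number of words yielded), every step is Python's step.
def wgLoop : List Char → Nat → List String
  | _, 0 => []
  | c, fuel + 1 =>
    String.ofList c ::
      (match wgBump c with
       | (c', false) => wgLoop c' fuel
       | (_, true) => [])

def word_generator (num_of_letters : Int) : List String :=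
  wgLoop (List.replicate num_of_letters.toNat 'a') (26 ^ num_of_letters.toNat)

-- ===== PORT B =====
-- gen(n): yield "" for n <= 0 (Int.toNat = 0), else each letter prefixed to every word of gen(n-1).
def wgGen : Nat → List String
  | 0 => [""]
  | n + 1 =>
    (List.range 26).flatMap (fun i =>
      (wgGen n).map (fun rest => String.ofList [Char.ofNat (97 + i)] ++ rest))

def word_generator_alt (num_of_letters : Int) : List String :=
  wgGen num_of_letters.toNat

-- ===== PRECONDITION & SPEC =====
def Spec_word_generator (num_of_letters : Int) (out : List String) : Prop := out = word_generator_alt num_of_letters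
instance (num_of_letters : Int) (out : List String) : Decidable (Spec_word_generator num_of_letters out) := by unfold Spec_word_generator; infer_instance

-- ===== CLAIM (what is proved, stated in full; the proofs are below) =====
def Claim_equal_word_generator : Prop := ∀ (num_of_letters : Int), Dom_word_generator num_of_letters → Spec_word_generator num_of_letters (word_generator num_of_letters)

-- ===== LEMMAS AND PROOFS =====

-- the alphabet, and all words of length n over it, in lexicographic order, as char lists
def wgLetters : List Char := (List.range 26).map (fun i => Char.ofNat (97 + i))

def wgEnum : Nat → List (List Char)
  | 0 => [[]]
  | n + 1 => wgLetters.flatMap (fun x => (wgEnum n).map (x :: ·))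

-- successor relation on letters, and the bump-step relation on words
def wgS (x y : Char) : Prop := x < 'z' ∧ y = Char.ofNat (x.toNat + 1)
def wgR (a b : List Char) : Prop := wgBump a = (b, false)

theorem wgLetters_chain : List.IsChain wgS wgLetters := by
  have : List.IsChain (fun x y => x < 'z' ∧ y = Char.ofNat (x.toNat + 1)) wgLetters := by
    decide
  exact this.imp (fun a b h => h)

theorem wgLetters_eq :
    wgLetters = ['a','b','c','d','e','f','g','h','i','j','k','l','m',
                 'n','o','p','q','r','s','t','u','v','w','x','y','z'] := by decide

theorem wgEnum_length (n : Nat) : (wgEnum n).length = 26 ^ n := by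
  induction n with
  | zero => simp [wgEnum]
  | succ n ih =>
    simp only [wgEnum, List.length_flatMap, List.length_map]
    rw [List.map_const', List.sum_replicate, ih, smul_eq_mul]
    rw [show wgLetters.length = 26 from by decide]
    ring

theorem wgEnum_ne_nil (n : Nat) : wgEnum n ≠ [] := by
  intro h
  have := wgEnum_length n
  rw [h] at this
  have hp : 0 < 26 ^ n := pow_pos (by norm_num) n
  simp at this
  omega

theorem wgEnum_head? (n : Nat) : (wgEnum n).head? = some (List.replicate n 'a') := by
  induction n with
  | zero => simp [wgEnum]
  | succ n ih =>
    have hsplit : wgEnum (n + 1) = (wgEnum n).map ('a' :: ·) ++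
        (['b','c','d','e','f','g','h','i','j','k','l','m','n','o','p','q','r',
          's','t','u','v','w','x','y','z'].flatMap (fun x => (wgEnum n).map (x :: ·))) := by
      show wgLetters.flatMap (fun x => (wgEnum n).map (x :: ·)) = _
      rw [wgLetters_eq]
      simp [List.flatMap_cons]
    rw [hsplit, List.head?_append, List.head?_map, ih]
    simp [List.replicate_succ]

theorem wgEnum_head (n : Nat) (h : wgEnum n ≠ []) :
    (wgEnum n).head h = List.replicate n 'a' := by
  rw [← Option.some_inj, ← List.head?_eq_head h, wgEnum_head?]

theorem wgEnum_getLast? (n : Nat) : (wgEnum n).getLast? = some (List.replicate n 'z') := by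
  induction n with
  | zero => simp [wgEnum]
  | succ n ih =>
    have hsplit : wgEnum (n + 1) =
        (['a','b','c','d','e','f','g','h','i','j','k','l','m','n','o','p','q','r',
          's','t','u','v','w','x','y'].flatMap (fun x => (wgEnum n).map (x :: ·))) ++
        (wgEnum n).map ('z' :: ·) := by
      show wgLetters.flatMap (fun x => (wgEnum n).map (x :: ·)) = _
      rw [wgLetters_eq]
      simp [List.flatMap_cons]
    rw [hsplit, List.getLast?_append, List.getLast?_map, ih]
    simp [List.replicate_succ]

theorem wgEnum_getLast (n : Nat) (h : wgEnum n ≠ []) :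
    (wgEnum n).getLast h = List.replicate n 'z' := by
  rw [← Option.some_inj, ← List.getLast?_eq_getLast h, wgEnum_getLast?]

theorem wgBump_replicate_z (n : Nat) :
    wgBump (List.replicate n 'z') = (List.replicate n 'a', true) := by
  induction n with
  | zero => simp [wgBump]
  | succ n ih => simp [List.replicate_succ, wgBump, ih]

theorem wgBump_cons_of_step (x : Char) {a b : List Char} (h : wgR a b) :
    wgR (x :: a) (x :: b) := by
  unfold wgR at *
  simp [wgBump, h]

theorem wgBump_block_step (n : Nat) {x y : Char} (h : wgS x y) :
    wgR (x :: List.replicate n 'z') (y :: List.replicate n 'a') := by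
  unfold wgR
  simp [wgBump, wgBump_replicate_z, h.1, h.2]

theorem wgEnum_chain (n : Nat) : List.IsChain wgR (wgEnum n) := by
  induction n with
  | zero => simp [wgEnum]
  | succ n ih =>
    have hne := wgEnum_ne_nil n
    -- chain of one block
    have hblk : ∀ x : Char, List.IsChain wgR ((wgEnum n).map (x :: ·)) := by
      intro x
      rw [List.isChain_map]
      exact ih.imp (fun a b hab => wgBump_cons_of_step x hab)
    -- chain over the letter list, by induction on it
    have main : ∀ ls : List Char, List.IsChain wgS ls →
        List.IsChain wgR (ls.flatMap (fun x => (wgEnum n).map (x :: ·))) := by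
      intro ls
      induction ls with
      | nil => intro _; simp
      | cons x t iht =>
        intro hch
        cases t with
        | nil => simpa using hblk x
        | cons y t' =>
          rw [List.isChain_cons] at hch
          have hS : wgS x y := hch.1 y rfl
          have hrest := iht hch.2
          rw [List.flatMap_cons]
          refine List.IsChain.append (hblk x) hrest ?_
          intro a ha b hb
          -- a = last of block x, b = head of the rest = y :: head (wgEnum n)
          have hbne : (wgEnum n).map (x :: ·) ≠ [] := by simpa using hne
          rw [List.getLast?_eq_getLast hbne] at ha
          have ha' : a = x :: List.replicate n 'z' := by
            have := List.getLast_map (f := (x :: ·)) (l := wgEnum n) hbne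
            rw [Option.mem_def, Option.some_inj] at ha
            rw [← ha, this, wgEnum_getLast n hne]
          obtain ⟨e, es, he⟩ := List.exists_cons_of_ne_nil hne
          have hb' : b = y :: e := by
            rw [List.flatMap_cons, he, List.map_cons, List.cons_append,
              List.head?_cons, Option.mem_def, Option.some_inj] at hb
            exact hb.symm
          have hehead : e = List.replicate n 'a' := by
            have hh := wgEnum_head? n
            rw [he] at hh
            simpa using hh
          rw [ha', hb', hehead]
          exact wgBump_block_step n hS
    exact main wgLetters wgLetters_chain

theorem wgLoop_of_chain (ws : List (List Char)) (h : ws ≠ [])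
    (hc : List.IsChain wgR ws)
    (hl : (wgBump (ws.getLast h)).2 = true) :
    wgLoop (ws.head h) ws.length = ws.map String.ofList := by
  induction ws with
  | nil => simp at h
  | cons c t ih =>
    cases t with
    | nil =>
      simp only [List.getLast_singleton] at hl
      obtain ⟨c', hc'⟩ : ∃ c', wgBump c = (c', true) :=
        ⟨(wgBump c).1, by rw [Prod.ext_iff]; exact ⟨rfl, hl⟩⟩
      simp [wgLoop, hc']
    | cons c' t' =>
      rw [List.isChain_cons] at hc
      have hstep : wgR c c' := hc.1 c' rfl
      have hne : c' :: t' ≠ [] := by simp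
      have hl' : (wgBump ((c' :: t').getLast hne)).2 = true := by
        have hgl : (c :: c' :: t').getLast h = (c' :: t').getLast hne :=
          List.getLast_cons hne
        rw [← hgl]; exact hl
      have ihr := ih hne hc.2 hl'
      simp only [List.head_cons] at ihr
      unfold wgR at hstep
      have h1 : wgLoop c ((c' :: t').length + 1) =
          String.ofList c :: wgLoop c' (c' :: t').length := by
        simp only [wgLoop]
        rw [hstep]
      show wgLoop c ((c' :: t').length + 1) = _
      rw [h1, ihr]
      rfl

theorem wgGen_eq_enum (n : Nat) : wgGen n = (wgEnum n).map String.ofList := by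
  induction n with
  | zero => simp [wgGen, wgEnum]
  | succ n ih =>
    show (List.range 26).flatMap (fun i =>
        (wgGen n).map (fun rest => String.ofList [Char.ofNat (97 + i)] ++ rest)) = _
    rw [show wgEnum (n+1) = wgLetters.flatMap (fun x => (wgEnum n).map (x :: ·)) from rfl]
    rw [wgLetters, ih]
    rw [List.flatMap_map, List.map_flatMap]
    refine List.flatMap_congr (fun i _ => ?_)
    rw [List.map_map, List.map_map]
    refine List.map_congr_left (fun l _ => ?_)
    show String.ofList [Char.ofNat (97 + i)] ++ String.ofList l = String.ofList (Char.ofNat (97 + i) :: l)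
    rw [← String.ofList_append]
    rfl

-- ===== VERDICT (by name: the statement is the Claim_ definition above) =====
theorem word_generator_spec : Claim_equal_word_generator := by
  intro n _
  show word_generator n = word_generator_alt n
  unfold word_generator word_generator_alt
  have h := wgEnum_ne_nil n.toNat
  rw [wgGen_eq_enum, ← wgEnum_head n.toNat h, ← wgEnum_length n.toNat]
  exact wgLoop_of_chain _ h (wgEnum_chain n.toNat)
    (by rw [wgEnum_getLast n.toNat h, wgBump_replicate_z])
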